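-- pv_equiv track=rewrite | github.com/taeGnues/PracticeBaekjoon | 프로그래머스/3/77486. 다단계 칫솔 판매/다단계 칫솔 판매.py | solution
-- ===== SOURCE A (Python) =====
-- def solution(enroll, referral, seller, amount):
--
--     adj = {enroll[i] : referral[i] for i in range(len(referral))}
--     revenues = {e:0 for e in enroll}
--
--     def go(money, curr):
--         if curr not in adj: # 민호 도달 혹은 분배할 돈 1원 미만.
--             return
--
--         if (money // 10) == 0 :
--             revenues[curr] += money
--             return
--
--         send = money // 10
--         mine = money - send
--
--         revenues[curr] += mine
--
--         go(send, adj[curr])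
--
--     for i in range(len(seller)):
--         go(100*amount[i], seller[i])
--
--
--     return list(revenues.values())
-- ===== SOURCE B (Python) =====
-- def solution(enroll, referral, seller, amount):
--     parent = dict(zip(enroll, referral))
--     total = {}
--     for curr, cnt in zip(seller, amount):
--         money = 100 * cnt
--         while curr in parent:
--             send = money // 10
--             total[curr] = total.get(curr, 0) + (money - send)
--             if send == 0:
--                 break
--             money, curr = send, parent[curr]
--     return [total.get(e, 0) for e in dict.fromkeys(enroll)]
-- ===== Notes on version B (the rewrite author's own statement) =====
-- stated objective: simpler
-- what changed: Replaces A's recursive closure `go` mutating a pre-initialised revenue dict with an iterative while-loop over the referral chain that accumulates into a sparse totals dict (built over zip(seller, amount) and dict(zip(enroll, referral))), projected at the end over dict.fromkeys(enroll); same O(total chain length) cost.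
import Mathlib
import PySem

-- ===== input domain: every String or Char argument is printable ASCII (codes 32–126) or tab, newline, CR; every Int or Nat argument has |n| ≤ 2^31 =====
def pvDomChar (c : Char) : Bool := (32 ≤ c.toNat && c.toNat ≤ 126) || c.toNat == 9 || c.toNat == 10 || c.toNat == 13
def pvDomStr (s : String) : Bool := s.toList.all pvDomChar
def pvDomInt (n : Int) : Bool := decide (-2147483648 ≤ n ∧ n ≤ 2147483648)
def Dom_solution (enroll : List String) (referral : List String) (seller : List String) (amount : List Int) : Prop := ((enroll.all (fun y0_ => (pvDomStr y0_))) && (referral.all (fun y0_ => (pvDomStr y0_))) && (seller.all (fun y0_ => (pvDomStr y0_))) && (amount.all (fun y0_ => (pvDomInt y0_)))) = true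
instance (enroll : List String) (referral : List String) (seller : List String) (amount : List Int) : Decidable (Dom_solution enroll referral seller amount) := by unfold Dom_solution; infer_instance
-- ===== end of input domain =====

-- B replaces A's recursive `go` helper and pre-initialised revenue dict by an iterative
-- while-loop over the referral chain and a sparse total dict projected over dict.fromkeys(enroll).
-- Equivalence is about the RETURN value; neither version mutates its arguments.

-- ===== PORT A =====
-- the recursive helper `go`; `fuel` bounds the recursion depth (Python's call stack);
-- under Pre_solution the chain always stops before the fuel runs out
def goA (adj : PySem.Dict String String) (fuel : Nat) (money : Int) (curr : String)
    (rev : PySem.Dict String Int) : PySem.Dict String Int :=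
  match fuel with
  | 0 => rev
  | fuel + 1 =>
    if adj.contains curr = false then rev
    else if PySem.Int.floordiv money 10 = 0 then rev.modify curr 0 (fun v => v + money)
    else
      let send := PySem.Int.floordiv money 10
      let mine := money - send
      goA adj fuel send ((adj.get? curr).getD "") (rev.modify curr 0 (fun v => v + mine))

def solution (enroll : List String) (referral : List String) (seller : List String) (amount : List Int) : List Int :=
  let adj := (PySem.List.pyRange 0 (referral.length : Int) 1).foldl
      (fun d i => d.insert ((PySem.List.pyGet? enroll i).getD "") ((PySem.List.pyGet? referral i).getD ""))
      PySem.Dict.empty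
  let revenues := enroll.foldl (fun d e => d.insert e 0) (PySem.Dict.empty : PySem.Dict String Int)
  let fuel := adj.size + 64
  let revF := (PySem.List.pyRange 0 (seller.length : Int) 1).foldl
      (fun r i => goA adj fuel (100 * ((PySem.List.pyGet? amount i).getD 0))
        ((PySem.List.pyGet? seller i).getD "") r) revenues
  revF.values

-- ===== PORT B =====
-- the body of B's `while curr in parent` loop; same fuel bound as A's call stack
def stepB (parent : PySem.Dict String String) (fuel : Nat) (money : Int) (curr : String)
    (tot : PySem.Dict String Int) : PySem.Dict String Int :=
  match fuel with
  | 0 => tot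
  | fuel + 1 =>
    if parent.contains curr then
      let send := PySem.Int.floordiv money 10
      let tot' := tot.insert curr (tot.getD curr 0 + (money - send))
      if send = 0 then tot'
      else stepB parent fuel send ((parent.get? curr).getD "") tot'
    else tot

def solution_alt (enroll : List String) (referral : List String) (seller : List String) (amount : List Int) : List Int :=
  let parent := PySem.Dict.ofList (enroll.zip referral)
  let fuel := parent.size + 64
  let total := (seller.zip amount).foldl
      (fun t p => stepB parent fuel (100 * p.2) p.1 t) (PySem.Dict.empty : PySem.Dict String Int)
  (PySem.List.dedup enroll).map (fun e => total.getD e 0)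

-- ===== PRECONDITION & SPEC =====
-- Pre_ excludes exactly the inputs where Python A does not return: referral longer than enroll or
-- seller longer than amount (IndexError), and a seller with a NEGATIVE amount whose referral chain
-- never leaves the referral map (the recursion then never stops: RecursionError).  The last case is
-- stated as a bounded existential on the input referral map: some iterate of the map (an exiting
-- chain visits distinct names, so enroll.length iterates suffice) falls outside its keys.
def Pre_solution (enroll : List String) (referral : List String) (seller : List String) (amount : List Int) : Prop :=
  referral.length ≤ enroll.length ∧ seller.length ≤ amount.length ∧
  ∀ p ∈ seller.zip amount, p.2 < 0 →
    ∃ n ≤ enroll.length,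
      (PySem.Dict.ofList (enroll.zip referral)).contains
        ((fun s => ((PySem.Dict.ofList (enroll.zip referral)).get? s).getD "")^[n] p.1) = false

instance (enroll : List String) (referral : List String) (seller : List String) (amount : List Int) : Decidable (Pre_solution enroll referral seller amount) := by
  unfold Pre_solution; infer_instance

def pvWitness_solution : List String × List String × List String × List Int :=
  (["john", "mary", "edward"], ["-", "john", "mary"], ["edward", "mary"], [5, 10])

def Spec_solution (enroll : List String) (referral : List String) (seller : List String) (amount : List Int) (out : List Int) : Prop := out = solution_alt enroll referral seller amount
instance (enroll : List String) (referral : List String) (seller : List String) (amount : List Int) (out : List Int) : Decidable (Spec_solution enroll referral seller amount out) := by unfold Spec_solution; infer_instance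

-- ===== CLAIM (what is proved, stated in full; the proofs are below) =====
def Claim_equal_solution : Prop := ∀ (enroll : List String) (referral : List String) (seller : List String) (amount : List Int), Dom_solution enroll referral seller amount → Pre_solution enroll referral seller amount → Spec_solution enroll referral seller amount (solution enroll referral seller amount)

-- ===== LEMMAS AND PROOFS =====

-- a fold over range n of positional lookups is a fold over the zipped lists (n ≤ both lengths)
lemma foldl_range_getD_zip {α β σ : Type} (l1 : List α) (l2 : List β) (d1 : α) (d2 : β)
    (f : σ → α → β → σ) :
    ∀ (n : Nat), n ≤ l1.length → n ≤ l2.length → ∀ (s : σ),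
      (List.range n).foldl (fun s k => f s ((l1[k]?).getD d1) ((l2[k]?).getD d2)) s
        = ((l1.zip l2).take n).foldl (fun s p => f s p.1 p.2) s := by
  intro n
  induction n with
  | zero => simp
  | succ m ih =>
    intro h1 h2 s
    have hm1 : m < l1.length := h1
    have hm2 : m < l2.length := h2
    have hz : m < (l1.zip l2).length := by simp [List.length_zip]; omega
    rw [List.range_succ, List.foldl_append, ih (by omega) (by omega)]
    have : (l1.zip l2).take (m+1) = (l1.zip l2).take m ++ [(l1.zip l2)[m]] := by
      rw [List.take_add_one]
      simp [List.getElem?_eq_getElem hz]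
    rw [this, List.foldl_append]
    simp [List.getElem?_eq_getElem hm1, List.getElem?_eq_getElem hm2, List.getElem_zip]

-- A's recursion and B's loop change their dicts by the same pointwise amounts
lemma step_getD (adj : PySem.Dict String String) :
    ∀ (fuel : Nat) (money : Int) (curr : String) (rev tot : PySem.Dict String Int) (k : String),
      (goA adj fuel money curr rev).getD k 0 + tot.getD k 0
        = rev.getD k 0 + (stepB adj fuel money curr tot).getD k 0 := by
  intro fuel
  induction fuel with
  | zero => intro money curr rev tot k; simp [goA, stepB]
  | succ m ih =>
    intro money curr rev tot k
    by_cases hc : adj.contains curr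
    · by_cases hs : PySem.Int.floordiv money 10 = 0
      · simp only [goA, stepB, hc, hs, if_true, if_false, Bool.true_eq_false]
        rw [PySem.Dict.getD_modify, PySem.Dict.getD_insert]
        split_ifs with hk
        · subst hk; ring
        · ring
      · simp only [goA, stepB, hc, hs, if_true, if_false, Bool.true_eq_false]
        have hih := ih (PySem.Int.floordiv money 10) ((adj.get? curr).getD "")
          (rev.modify curr 0 (fun v => v + (money - PySem.Int.floordiv money 10)))
          (tot.insert curr (tot.getD curr 0 + (money - PySem.Int.floordiv money 10))) k
        rw [PySem.Dict.getD_modify, PySem.Dict.getD_insert] at hih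
        split_ifs at hih with hk
        · subst hk; omega
        · omega
    · simp [goA, stepB, hc]

-- A's recursion never touches a key outside rev when every adj key is already in rev
lemma goA_keys (adj : PySem.Dict String String) :
    ∀ (fuel : Nat) (money : Int) (curr : String) (rev : PySem.Dict String Int),
      (∀ x, adj.contains x = true → rev.contains x = true) →
      (goA adj fuel money curr rev).keys = rev.keys := by
  intro fuel
  induction fuel with
  | zero => intro _ _ _ _; simp [goA]
  | succ m ih =>
    intro money curr rev hsub
    by_cases hc : adj.contains curr
    · have hrc : rev.contains curr = true := hsub curr hc
      have hkeys : ∀ (f : Int → Int), (rev.modify curr 0 f).keys = rev.keys := by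
        intro f
        rw [PySem.Dict.keys_modify, PySem.Dict.keys_insert_of_contains rev _ hrc]
      by_cases hs : PySem.Int.floordiv money 10 = 0
      · simp only [goA, hc, hs, if_true, if_false, Bool.true_eq_false]
        exact hkeys _
      · simp only [goA, hc, hs, if_false, Bool.true_eq_false]
        rw [ih _ _ _ ?_, hkeys]
        intro x hx
        have hmem := hsub x hx
        rw [PySem.Dict.contains_iff_mem_keys] at hmem ⊢
        rw [hkeys]; exact hmem
    · simp [goA, hc]

-- the whole seller loop changes the two dicts by the same pointwise amounts
lemma fold_getD (adj : PySem.Dict String String) (fuel : Nat) :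
    ∀ (l : List (String × Int)) (rev tot : PySem.Dict String Int) (k : String),
      (l.foldl (fun r p => goA adj fuel (100 * p.2) p.1 r) rev).getD k 0 + tot.getD k 0
        = rev.getD k 0 + (l.foldl (fun t p => stepB adj fuel (100 * p.2) p.1 t) tot).getD k 0 := by
  intro l
  induction l with
  | nil => intro rev tot k; simp
  | cons p l ih =>
    intro rev tot k
    simp only [List.foldl_cons]
    have h1 := step_getD adj fuel (100 * p.2) p.1 rev tot k
    have h2 := ih (goA adj fuel (100 * p.2) p.1 rev) (stepB adj fuel (100 * p.2) p.1 tot) k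
    omega

-- the whole seller loop never changes the key list of A's revenue dict
lemma fold_keys (adj : PySem.Dict String String) (fuel : Nat) :
    ∀ (l : List (String × Int)) (rev : PySem.Dict String Int),
      (∀ x, adj.contains x = true → rev.contains x = true) →
      (l.foldl (fun r p => goA adj fuel (100 * p.2) p.1 r) rev).keys = rev.keys := by
  intro l
  induction l with
  | nil => intro rev _; simp
  | cons p l ih =>
    intro rev hsub
    simp only [List.foldl_cons]
    have hg := goA_keys adj fuel (100 * p.2) p.1 rev hsub
    rw [ih _ ?_, hg]
    intro x hx
    have hmem := hsub x hx
    rw [PySem.Dict.contains_iff_mem_keys] at hmem ⊢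
    rw [hg]; exact hmem

-- the revenue dict A starts from maps every key to 0
lemma getD_init_zero : ∀ (l : List String) (d : PySem.Dict String Int) (k : String),
    d.getD k 0 = 0 → (l.foldl (fun d e => d.insert e 0) d).getD k 0 = 0 := by
  intro l
  induction l with
  | nil => intro d k h; simpa using h
  | cons e l ih =>
    intro d k h
    simp only [List.foldl_cons]
    apply ih
    rw [PySem.Dict.getD_insert]
    split_ifs <;> simp [h]

theorem solution_spec : Claim_equal_solution := by
  intro enroll referral seller amount _ hpre
  obtain ⟨h1, h2, -⟩ := hpre
  unfold Spec_solution solution solution_alt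
  dsimp only
  -- A's adj dict is B's parent dict
  have hadj : (PySem.List.pyRange 0 (referral.length : Int) 1).foldl
      (fun d i => d.insert ((PySem.List.pyGet? enroll i).getD "") ((PySem.List.pyGet? referral i).getD ""))
      PySem.Dict.empty = PySem.Dict.ofList (enroll.zip referral) := by
    rw [PySem.List.pyRange_zero_natCast, List.foldl_map]
    simp only [PySem.List.pyGet?_natCast]
    have h := foldl_range_getD_zip enroll referral "" ""
      (fun d a b => PySem.Dict.insert d a b) referral.length h1 le_rfl PySem.Dict.empty
    simp only [] at h
    rw [h, List.take_of_length_le (by simp [List.length_zip])]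
    rfl
  rw [hadj]
  generalize hA : PySem.Dict.ofList (enroll.zip referral) = adj at *
  -- A's seller loop is a fold over the zipped (seller, amount) list
  have hloop :
      (PySem.List.pyRange 0 (seller.length : Int) 1).foldl
        (fun r i => goA adj (adj.size + 64) (100 * ((PySem.List.pyGet? amount i).getD 0))
          ((PySem.List.pyGet? seller i).getD "") r)
        (enroll.foldl (fun d e => d.insert e 0) (PySem.Dict.empty : PySem.Dict String Int))
      = (seller.zip amount).foldl
          (fun r p => goA adj (adj.size + 64) (100 * p.2) p.1 r)
          (enroll.foldl (fun d e => d.insert e 0) (PySem.Dict.empty : PySem.Dict String Int)) := by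
    rw [PySem.List.pyRange_zero_natCast, List.foldl_map]
    simp only [PySem.List.pyGet?_natCast]
    have h := foldl_range_getD_zip seller amount "" (0 : Int)
      (fun r a b => goA adj (adj.size + 64) (100 * b) a r) seller.length le_rfl h2
      (enroll.foldl (fun d e => d.insert e 0) (PySem.Dict.empty : PySem.Dict String Int))
    simp only [] at h
    rw [h, List.take_of_length_le (by simp [List.length_zip])]
  rw [hloop]
  set rev0 := enroll.foldl (fun d e => d.insert e 0) (PySem.Dict.empty : PySem.Dict String Int)
    with hrev0
  set revF := (seller.zip amount).foldl (fun r p => goA adj (adj.size + 64) (100 * p.2) p.1 r) rev0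
    with hrevF
  set totF := (seller.zip amount).foldl (fun t p => stepB adj (adj.size + 64) (100 * p.2) p.1 t)
    (PySem.Dict.empty : PySem.Dict String Int) with htotF
  -- key lists
  have hkeys0 : rev0.keys = PySem.Set.ofList enroll := by
    rw [hrev0, PySem.Dict.keys_foldl_insert enroll (fun _ _ => 0), PySem.Dict.keys_empty]
    rfl
  have hnd0 : rev0.keys.Nodup := by
    rw [hrev0]
    exact PySem.Dict.nodup_keys_foldl_insert enroll (fun _ _ => 0) _
      (by rw [PySem.Dict.keys_empty]; exact List.nodup_nil)
  have hsub : ∀ x, adj.contains x = true → rev0.contains x = true := by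
    intro x hx
    rw [PySem.Dict.contains_iff_mem_keys] at hx ⊢
    rw [hkeys0, PySem.Set.mem_ofList]
    have hk : adj.keys = PySem.Set.ofList ((enroll.zip referral).map Prod.fst) := by
      rw [← hA]
      show ((enroll.zip referral).foldl (fun d p => d.insert p.1 p.2) PySem.Dict.empty).keys = _
      rw [PySem.Dict.keys_foldl_insert_key (enroll.zip referral) Prod.fst (fun _ p => p.2),
        PySem.Dict.keys_empty]
      rfl
    rw [hk, PySem.Set.mem_ofList] at hx
    obtain ⟨p, hp, rfl⟩ := List.mem_map.mp hx
    exact (List.of_mem_zip hp).1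
  have hkeysF : revF.keys = rev0.keys := fold_keys adj (adj.size + 64) _ rev0 hsub
  -- pointwise values
  have hpt : ∀ k, revF.getD k 0 = totF.getD k 0 := by
    intro k
    have h := fold_getD adj (adj.size + 64) (seller.zip amount) rev0 PySem.Dict.empty k
    rw [PySem.Dict.getD_empty] at h
    have h0 : rev0.getD k 0 = 0 := getD_init_zero enroll _ k (PySem.Dict.getD_empty k 0)
    rw [← hrevF, ← htotF, h0] at h
    omega
  -- assemble
  rw [PySem.Dict.values_eq_map_keys revF (hkeysF ▸ hnd0) 0, hkeysF, hkeys0]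
  rw [show PySem.List.dedup enroll = PySem.Set.ofList enroll from rfl]
  exact List.map_congr_left (fun k _ => hpt k)
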